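-- pv_equiv track=rewrite | github.com/roshini-kotagiri/cdcn_codes | byte.py | byte_destuffing
-- ===== SOURCE A (Python) =====
-- def byte_destuffing(data):
--     # Define the FLAG and ESC characters
--     FLAG = "FLAG"
--     ESC = "ESC"
--
--     # Remove the FLAG at the start and end
--     words = data.split()
--     if words[0] == FLAG:
--         words = words[1:]
--     if words[-1] == FLAG:
--         words = words[:-1]
--
--     # Initialize the destuffed data
--     destuffed_data = []
--
--     # Iterate through the words to remove stuffing
--     i = 0
--     while i < len(words):
--         if words[i] == ESC:
--             if i + 1 < len(words) and (words[i + 1] == FLAG or words[i + 1] == ESC):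
--                 destuffed_data.append(words[i + 1])
--                 i += 2
--             else:
--                 destuffed_data.append(words[i])
--                 i += 1
--         else:
--             destuffed_data.append(words[i])
--             i += 1
--
--     # Join the list back into a string
--     return " ".join(destuffed_data)
-- ===== SOURCE B (Python) =====
-- def byte_destuffing(data):
--     FLAG = "FLAG"
--     ESC = "ESC"
--     words = data.split()
--     if words and words[0] == FLAG:
--         words = words[1:]
--     if words and words[-1] == FLAG:
--         words = words[:-1]
--     out = []
--     pending = False
--     for w in words:
--         if pending:
--             if w == FLAG or w == ESC:
--                 out.append(w)
--             else:
--                 out.append(ESC)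
--                 out.append(w)
--             pending = False
--         elif w == ESC:
--             pending = True
--         else:
--             out.append(w)
--     if pending:
--         out.append(ESC)
--     return " ".join(out)
-- ===== Notes on version B (the rewrite author's own statement) =====
-- stated objective: alternative
-- what changed: Replaced A's index-based while loop with one-token lookahead by a forward pass over the words carrying a pending-ESC boolean state (trailing pending ESC flushed after the loop); the FLAG-strip prologue guards against empty lists instead of raising.
import Mathlib
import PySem

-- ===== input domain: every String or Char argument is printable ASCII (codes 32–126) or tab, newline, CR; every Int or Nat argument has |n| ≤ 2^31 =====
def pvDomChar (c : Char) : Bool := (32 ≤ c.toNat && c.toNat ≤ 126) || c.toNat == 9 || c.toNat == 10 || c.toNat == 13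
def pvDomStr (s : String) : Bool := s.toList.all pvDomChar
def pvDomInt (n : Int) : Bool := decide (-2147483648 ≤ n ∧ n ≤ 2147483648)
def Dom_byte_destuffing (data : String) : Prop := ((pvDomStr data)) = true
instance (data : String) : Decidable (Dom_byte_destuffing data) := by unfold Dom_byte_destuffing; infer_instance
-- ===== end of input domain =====

-- B replaces A's index-based while loop with one-token lookahead by a forward pass
-- carrying a pending-ESC boolean state (objective: alternative decomposition; same cost).

-- ===== PORT A =====
-- A's while loop over index i, looking ahead one word; transliterated as recursion on the suffix.
def byteLoopA : List String → List String
  | [] => []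
  | w :: rest =>
    if w = "ESC" then
      match rest with
      | n :: rest' =>
        if n = "FLAG" ∨ n = "ESC" then n :: byteLoopA rest'
        else w :: byteLoopA (n :: rest')
      | [] => [w]
    else w :: byteLoopA rest

def byte_destuffing (data : String) : String :=
  let words := PySem.Str.split₀ data
  match words with
  | [] => ""   -- Python raises IndexError on words[0]; excluded by Pre_
  | w0 :: rest =>
    let words1 := if w0 = "FLAG" then rest else w0 :: rest
    match words1.getLast? with
    | none => ""   -- Python raises IndexError on words[-1]; excluded by Pre_
    | some l =>
      let words2 := if l = "FLAG" then words1.dropLast else words1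
      PySem.Str.join " " (byteLoopA words2)

-- ===== PORT B =====
-- B's forward pass with a pending-ESC flag (flushed at the end of the list).
def byteLoopB : Bool → List String → List String
  | true, [] => ["ESC"]
  | false, [] => []
  | true, w :: r => (if w = "FLAG" ∨ w = "ESC" then [w] else ["ESC", w]) ++ byteLoopB false r
  | false, w :: r => if w = "ESC" then byteLoopB true r else w :: byteLoopB false r

def byte_destuffing_alt (data : String) : String :=
  let words := PySem.Str.split₀ data
  let words1 := match words with
    | w0 :: rest => if w0 = "FLAG" then rest else w0 :: rest
    | [] => []
  let words2 := if words1.getLast? = some "FLAG" then words1.dropLast else words1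
  PySem.Str.join " " (byteLoopB false words2)

-- ===== PRECONDITION & SPEC =====
-- Pre_ excludes exactly the inputs on which A raises IndexError: whitespace-only data
-- (empty word list) and data whose words are exactly ["FLAG"].
def Pre_byte_destuffing (data : String) : Prop :=
  PySem.Str.split₀ data ≠ [] ∧ PySem.Str.split₀ data ≠ ["FLAG"]
instance (data : String) : Decidable (Pre_byte_destuffing data) := by
  unfold Pre_byte_destuffing; infer_instance
def pvWitness_byte_destuffing : String := "FLAG ESC FLAG a FLAG"

def Spec_byte_destuffing (data : String) (out : String) : Prop := out = byte_destuffing_alt data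
instance (data : String) (out : String) : Decidable (Spec_byte_destuffing data out) := by
  unfold Spec_byte_destuffing; infer_instance

-- ===== CLAIM (what is proved, stated in full; the proofs are below) =====
def Claim_equal_byte_destuffing : Prop := ∀ (data : String), Dom_byte_destuffing data → Pre_byte_destuffing data → Spec_byte_destuffing data (byte_destuffing data)

-- ===== LEMMAS AND PROOFS =====
theorem byteLoop_eq (ws : List String) : byteLoopA ws = byteLoopB false ws := by
  induction ws using byteLoopA.induct with
  | case1 => rfl
  | case2 n rest' hn ih =>
    unfold byteLoopA byteLoopB
    simp only [if_pos hn, ih]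
    rcases hn with h | h <;> simp [h, byteLoopB]
  | case3 n rest' hn ih =>
    have hne : n ≠ "ESC" := fun h => hn (Or.inr h)
    have hnf : n ≠ "FLAG" := fun h => hn (Or.inl h)
    unfold byteLoopA byteLoopB
    simp [hnf, hne, ih, byteLoopB]
  | case4 =>
    rfl
  | case5 w rest hw ih =>
    unfold byteLoopA byteLoopB
    simp [hw, ih]

-- ===== VERDICT (by name: the statement is the Claim_ definition above) =====
theorem byte_destuffing_spec : Claim_equal_byte_destuffing := by
  intro data _ hpre
  unfold Spec_byte_destuffing byte_destuffing byte_destuffing_alt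
  obtain ⟨h1, h2⟩ := hpre
  cases hws : PySem.Str.split₀ data with
  | nil => exact absurd hws h1
  | cons w0 rest =>
    simp only
    by_cases hw0 : w0 = "FLAG"
    · cases rest with
      | nil => exact absurd (by rw [hws, hw0]) h2
      | cons r rs =>
        simp [hw0, byteLoop_eq]
        cases hl : (r :: rs).getLast? with
        | none => simp [List.getLast?] at hl
        | some l =>
          by_cases hlf : l = "FLAG" <;> simp [hlf]
    · simp [hw0]
      cases hl : (w0 :: rest).getLast? with
      | none => simp [List.getLast?] at hl
      | some l =>
        by_cases hlf : l = "FLAG" <;> simp [hlf, byteLoop_eq]
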